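-- pv_equiv track=rewrite | github.com/Shravankumar1989/MyInterviewDocs | test4.py | possibilities
-- ===== SOURCE A (Python) =====
-- from typing import List
--
-- def possibilities(word: str) -> List[str]:
--
--     # Morse code mapping to letters
--     morse_dict = {
--         ".": "E", "-": "T",
--         "..": "I", ".-": "A", "-.": "N", "--": "M",
--         "...": "S", "..-": "U", ".-.": "R", ".--": "W",
--         "-..": "D", "-.-": "K", "--.": "G", "---": "O"
--     }
--
--     # Helper function to generate possible signal combinations
--     def generate_combinations(signal: str) -> List[str]:
--         # Base case: if the signal is empty, return an empty combination
--         if not signal: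
--             return ['']
--
--         # Get the first character (current signal) and the rest
--         first = signal[0]
--         rest = signal[1:]
--
--         # Recursive call to get combinations for the remaining part of the signal
--         rest_combinations = generate_combinations(rest)
--
--         if first == '?':
--             # If the current signal is '?', it can be either '.' (dot) or '-' (dash)
--             return [dot + comb for dot in ['.', '-'] for comb in rest_combinations]
--         else:
--             # Otherwise, keep the current signal and add it to each combination of the rest
--             return [first + comb for comb in rest_combinations]
--
--     # Generate all possible signal combinations from the input word
--     all_combinations = generate_combinations(word)
--
--     # Create a set to store unique letters from the generated combinations
--     possible_letters = set()
--
--     # For each combination, check if it exists in the Morse code dictionary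
--     for comb in all_combinations:
--         if comb in morse_dict:
--             # Add the corresponding letter to the set
--             possible_letters.add(morse_dict[comb])
--
--     # Sort the letters based on the order they appear in the morse_dict
--     sorted_letters = sorted(possible_letters, key=lambda x: list(morse_dict.values()).index(x))
--
--     return sorted_letters
-- ===== SOURCE B (Python) =====
-- from typing import List
--
-- def possibilities(word: str) -> List[str]:
--     # Arithmetic decoding: a morse code of length n, read as a binary numeral
--     # (dot=0, dash=1), indexes the n-th row of the letter table in exactly the
--     # dict's order, so the increasing index list gives the answer with no sort.
--     rows = {1: ["E", "T"],
--             2: ["I", "A", "N", "M"],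
--             3: ["S", "U", "R", "W", "D", "K", "G", "O"]}
--     row = rows.get(len(word))
--     if row is None:
--         return []
--     idxs = [0]
--     for ch in word:
--         if ch == '.':
--             bits = [0]
--         elif ch == '-':
--             bits = [1]
--         elif ch == '?':
--             bits = [0, 1]
--         else:
--             return []
--         idxs = [2 * i + b for i in idxs for b in bits]
--     return [row[i] for i in idxs]
-- ===== Notes on version B (the rewrite author's own statement) =====
-- stated objective: faster
-- what changed: B decodes the wildcard pattern arithmetically: reading dots and dashes as binary digits it builds the increasing list of matching row indices in one pass and indexes a per-length letter table, instead of recursively generating all wildcard expansions of the code, filtering them through the dict into a set and re-sorting by table index.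
import Mathlib
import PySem

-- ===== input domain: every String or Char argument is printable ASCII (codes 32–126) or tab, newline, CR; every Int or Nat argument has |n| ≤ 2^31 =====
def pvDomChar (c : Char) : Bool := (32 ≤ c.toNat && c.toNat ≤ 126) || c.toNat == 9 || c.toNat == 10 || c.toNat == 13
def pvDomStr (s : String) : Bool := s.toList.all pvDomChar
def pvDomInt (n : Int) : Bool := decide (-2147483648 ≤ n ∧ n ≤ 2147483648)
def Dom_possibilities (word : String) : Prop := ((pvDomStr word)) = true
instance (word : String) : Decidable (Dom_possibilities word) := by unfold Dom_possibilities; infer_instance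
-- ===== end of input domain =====

-- B decodes the wildcard pattern arithmetically (binary row indices into a per-length letter
-- table) instead of generating all expansions, filtering through the dict and re-sorting (faster).

-- ===== PORT A =====
-- the morse_dict literal, keys as char lists
def pvMorse : List (List Char × String) :=
  [(['.'], "E"), (['-'], "T"),
   (['.','.'], "I"), (['.','-'], "A"), (['-','.'], "N"), (['-','-'], "M"),
   (['.','.','.'], "S"), (['.','.','-'], "U"), (['.','-','.'], "R"), (['.','-','-'], "W"),
   (['-','.','.'], "D"), (['-','.','-'], "K"), (['-','-','.'], "G"), (['-','-','-'], "O")]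

def pvMorseDict : PySem.Dict (List Char) String := PySem.Dict.ofList pvMorse

-- generate_combinations, on the char list of the signal
def pvGen : List Char → List (List Char)
  | [] => [[]]
  | f :: rest =>
    let rc := pvGen rest
    if f = '?' then ['.', '-'].flatMap (fun d => rc.map (fun comb => d :: comb))
    else rc.map (fun comb => f :: comb)

def possibilities (word : String) : List String :=
  let allCombs := pvGen word.toList
  let possibleLetters : PySem.Set String :=
    allCombs.foldl (fun s comb =>
      match pvMorseDict.get? comb with
      | some l => PySem.Set.add s l
      | none => s) PySem.Set.empty
  -- key = list(morse_dict.values()).index(x); .index never raises here (x is always a value), so getD 0 is exact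
  PySem.List.sorted possibleLetters (fun x => (PySem.List.index? pvMorseDict.values x).getD 0) false

-- ===== PORT B =====
-- rows = {1: ..., 2: ..., 3: ...}
def pvRows : List (Nat × List String) :=
  [(1, ["E", "T"]),
   (2, ["I", "A", "N", "M"]),
   (3, ["S", "U", "R", "W", "D", "K", "G", "O"])]

-- loop body: Python's early 'return []' on a foreign char is modelled by an Option state
def pvStep (st : Option (List Nat)) (ch : Char) : Option (List Nat) :=
  match st with
  | none => none
  | some idxs =>
    if ch = '.' then some (idxs.flatMap (fun i => [0].map (fun b => 2 * i + b)))
    else if ch = '-' then some (idxs.flatMap (fun i => [1].map (fun b => 2 * i + b)))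
    else if ch = '?' then some (idxs.flatMap (fun i => [0, 1].map (fun b => 2 * i + b)))
    else none

def possibilities_alt (word : String) : List String :=
  match pvRows.lookup word.toList.length with
  | none => []
  | some row =>
    match word.toList.foldl pvStep (some [0]) with
    | none => []
    | some idxs => idxs.map (fun i => row.getD i "")  -- row[i]: i < 2^len = row.length always

-- ===== PRECONDITION & SPEC =====
def Spec_possibilities (word : String) (out : List String) : Prop := out = possibilities_alt word
instance (word : String) (out : List String) : Decidable (Spec_possibilities word out) := by unfold Spec_possibilities; infer_instance

-- ===== CLAIM (what is proved, stated in full; the proofs are below) =====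
def Claim_equal_possibilities : Prop := ∀ (word : String), Dom_possibilities word → Spec_possibilities word (possibilities word)

-- ===== LEMMAS AND PROOFS =====

-- the per-position match predicate both sides are shown to compute
def pvP (w : List Char) (p : List Char × String) : Bool :=
  (p.1.length == w.length) && (w.zip p.1).all (fun wc => wc.1 == wc.2 || wc.1 == '?')

def pvMM : List Char → List Char → Bool
  | [], [] => true
  | x :: xs, y :: ys => (x == y || x == '?') && pvMM xs ys
  | _, _ => false

theorem pvP_eq (w : List Char) (p : List Char × String) : pvP w p = pvMM w p.1 := by
  obtain ⟨c, L⟩ := p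
  show ((c.length == w.length) && (w.zip c).all fun wc => wc.1 == wc.2 || wc.1 == '?') = pvMM w c
  induction w generalizing c with
  | nil => cases c <;> simp [pvMM]
  | cons x xs ih =>
    cases c with
    | nil => simp [pvMM]
    | cons y ys =>
      simp only [List.zip_cons_cons, List.all_cons, pvMM, List.length_cons]
      have ha : ((ys.length + 1 : Nat) == xs.length + 1) = (ys.length == xs.length) := by
        rw [Bool.eq_iff_iff]; simp
      rw [ha, ← ih ys, Bool.and_left_comm]

-- membership in generate_combinations = pvMM, for codes over {'.','-'}
theorem pvGen_mem (w : List Char) (c : List Char) (hc : ∀ ch ∈ c, ch = '.' ∨ ch = '-') :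
    c ∈ pvGen w ↔ pvMM w c = true := by
  induction w generalizing c with
  | nil => cases c <;> simp [pvGen, pvMM]
  | cons x xs ih =>
    cases c with
    | nil => by_cases hx : x = '?' <;> simp [pvGen, hx, pvMM]
    | cons y ys =>
      have hy := hc y (List.mem_cons_self ..)
      have hys : ∀ ch ∈ ys, ch = '.' ∨ ch = '-' := fun ch h => hc ch (List.mem_cons_of_mem _ h)
      by_cases hx : x = '?'
      · subst hx
        have hgen : pvGen ('?' :: xs) =
            ['.', '-'].flatMap (fun d => (pvGen xs).map (fun comb => d :: comb)) := by
          simp [pvGen]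
        rw [hgen]
        simp only [List.mem_flatMap, List.mem_map, pvMM, Bool.and_eq_true]
        constructor
        · rintro ⟨d, hd, a, ha, heq⟩
          injection heq with h1 h2
          subst h1; subst h2
          exact ⟨by simp, (ih _ hys).mp ha⟩
        · rintro ⟨-, h2⟩
          exact ⟨y, by rcases hy with rfl | rfl <;> simp, ys, (ih ys hys).mpr h2, rfl⟩
      · have hgen : pvGen (x :: xs) = (pvGen xs).map (fun comb => x :: comb) := by
          simp [pvGen, hx]
        rw [hgen]
        simp only [List.mem_map, pvMM, Bool.and_eq_true]
        constructor
        · rintro ⟨a, ha, heq⟩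
          injection heq with h1 h2
          subst h1; subst h2
          exact ⟨by simp, (ih _ hys).mp ha⟩
        · rintro ⟨h1, h2⟩
          simp only [Bool.or_eq_true, beq_iff_eq] at h1
          rcases h1 with rfl | rfl
          · exact ⟨ys, (ih ys hys).mpr h2, rfl⟩
          · exact absurd rfl hx

-- forward direction of dict lookup on a literal dict
theorem pvGet?_mem (l : List (List Char × String)) (c : List Char) (L : String)
    (h : (PySem.Dict.mk l).get? c = some L) : (c, L) ∈ l := by
  induction l with
  | nil => simp [PySem.Dict.get?] at h
  | cons p rest ih =>
    obtain ⟨k, v⟩ := p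
    rw [PySem.Dict.get?_mk_cons] at h
    by_cases hk : (k == c) = true
    · simp only [hk, if_pos] at h
      simp [← Option.some.injEq _ _ |>.mp h, (beq_iff_eq).mp hk]
    · simp only [hk] at h
      simp only [Bool.false_eq_true, if_false] at h
      exact List.mem_cons_of_mem _ (ih h)

theorem pvItems : pvMorseDict.items = pvMorse := by decide

theorem pvDict_get_iff (c : List Char) (L : String) :
    pvMorseDict.get? c = some L ↔ (c, L) ∈ pvMorse := by
  constructor
  · intro h
    have hd : pvMorseDict = PySem.Dict.mk pvMorse := by decide
    rw [hd] at h
    exact pvGet?_mem pvMorse c L h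
  · intro h
    have h' : (c, L) ∈ pvMorseDict.items := by rw [pvItems]; exact h
    exact PySem.Dict.get?_of_mem_items _ h' (by decide)

-- membership and nodup of the folded set
theorem pvFold_mem (l : List (List Char)) (s : PySem.Set String) (L : String) :
    L ∈ l.foldl (fun s comb =>
      match pvMorseDict.get? comb with
      | some lt => PySem.Set.add s lt
      | none => s) s ↔ L ∈ s ∨ ∃ c ∈ l, pvMorseDict.get? c = some L := by
  induction l generalizing s with
  | nil => simp
  | cons c cs ih =>
    simp only [List.foldl_cons]
    cases h : pvMorseDict.get? c with
    | none => rw [ih]; simp [h]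
    | some lt =>
      rw [ih]
      simp only [h, PySem.Set.mem_add, List.mem_cons, exists_eq_or_imp, Option.some.injEq]
      tauto

theorem pvFold_nodup (l : List (List Char)) (s : PySem.Set String) (hs : s.Nodup) :
    (l.foldl (fun s comb =>
      match pvMorseDict.get? comb with
      | some lt => PySem.Set.add s lt
      | none => s) s).Nodup := by
  induction l generalizing s with
  | nil => exact hs
  | cons c cs ih =>
    simp only [List.foldl_cons]
    cases h : pvMorseDict.get? c with
    | none => simp only [h]; exact ih _ hs
    | some lt => simp only [h]; exact ih _ (PySem.Set.nodup_add _ _ hs)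

-- A's pipeline equals the table filtered by the match predicate
-- the table's characters are only dots and dashes
theorem pvMorseChars : ∀ p ∈ pvMorse, ∀ ch ∈ p.1, ch = '.' ∨ ch = '-' := by
  intro p hp; fin_cases hp <;> (intro ch hch; fin_cases hch <;> simp)

-- A's sort key lists the table values in table order
set_option maxRecDepth 8192 in
theorem pvKeys : pvMorse.map (fun p => ((PySem.List.index? pvMorseDict.values p.2).getD 0))
    = [0, 1, 2, 3, 4, 5, 6, 7, 8, 9, 10, 11, 12, 13] := by decide

set_option maxRecDepth 8192 in
set_option maxHeartbeats 1000000 in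
theorem pvA_eq_filter (word : String) :
    possibilities word = ((pvMorse.filter (pvP word.toList)).map (fun p => p.2)) := by
  unfold possibilities
  set w := word.toList with hw
  set key : String → Nat := fun x => (PySem.List.index? pvMorseDict.values x).getD 0 with hkey
  have hmorseChars := pvMorseChars
  have hpair : ((pvMorse.filter (pvP w)).map (fun p => p.2)).Pairwise (fun a b => key a < key b) := by
    have hfull : (pvMorse.map (fun p => p.2)).Pairwise (fun a b => key a < key b) := by
      have h2 : (pvMorse.map (fun p => key p.2)).Pairwise (· < ·) := by
        rw [hkey, pvKeys]; decide
      rw [List.pairwise_map] at h2 ⊢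
      exact h2
    exact hfull.sublist (List.Sublist.map _ List.filter_sublist)
  have hnodupB : ((pvMorse.filter (pvP w)).map (fun p => p.2)).Nodup :=
    hpair.imp (fun h => by rintro rfl; exact lt_irrefl _ h)
  have hperm : ((pvMorse.filter (pvP w)).map (fun p => p.2)).Perm
      ((pvGen w).foldl (fun s comb =>
        match pvMorseDict.get? comb with
        | some lt => PySem.Set.add s lt
        | none => s) PySem.Set.empty) := by
    rw [List.perm_ext_iff_of_nodup hnodupB (pvFold_nodup (pvGen w) PySem.Set.empty List.nodup_nil)]
    intro L
    rw [pvFold_mem]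
    simp only [List.mem_map, List.mem_filter, PySem.Set.empty, List.not_mem_nil, false_or]
    constructor
    · rintro ⟨⟨c, Lc⟩, ⟨hmem, hp⟩, rfl⟩
      refine ⟨c, ?_, (pvDict_get_iff c Lc).mpr hmem⟩
      rw [pvP_eq] at hp
      exact (pvGen_mem w c (hmorseChars _ hmem)).mpr hp
    · rintro ⟨c, hc, hg⟩
      have hmem := (pvDict_get_iff c L).mp hg
      refine ⟨(c, L), ⟨hmem, ?_⟩, rfl⟩
      rw [pvP_eq]
      exact (pvGen_mem w c (hmorseChars _ hmem)).mp hc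
  exact PySem.List.sorted_eq_of_perm_of_pairwise_lt _ _ key hperm hpair

-- every char splits into the three recognised literals or none of them
theorem pvCharCases (c : Char) :
    c = '.' ∨ c = '-' ∨ c = '?' ∨
      ((c ≠ '.' ∧ c ≠ '-' ∧ c ≠ '?') ∧
       ((c == '.') = false ∧ (c == '-') = false ∧ (c == '?') = false)) := by
  by_cases h1 : c = '.'
  · exact Or.inl h1
  by_cases h2 : c = '-'
  · exact Or.inr (Or.inl h2)
  by_cases h3 : c = '?'
  · exact Or.inr (Or.inr (Or.inl h3))
  · exact Or.inr (Or.inr (Or.inr ⟨⟨h1, h2, h3⟩,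
      by simp [h1], by simp [h2], by simp [h3]⟩))

-- B's pipeline equals the same filtered table, by exhausting the (at most 3) positions
set_option maxRecDepth 8192 in
set_option maxHeartbeats 2000000 in
theorem pvB_eq_filter (l : List Char) :
    (match pvRows.lookup l.length with
     | none => ([] : List String)
     | some row =>
       match l.foldl pvStep (some [0]) with
       | none => []
       | some idxs => idxs.map (fun i => row.getD i "")) =
    ((pvMorse.filter (pvP l)).map (fun p => p.2)) := by
  match l with
  | [] => decide
  | [a] =>
    rcases pvCharCases a with rfl | rfl | rfl | ⟨⟨h1, h2, h3⟩, hb1, hb2, hb3⟩ <;>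
      first
      | decide
      | (simp [pvStep, pvP, pvMorse, pvRows, List.lookup, List.filter, *] <;> decide)
  | [a, b] =>
    rcases pvCharCases a with rfl | rfl | rfl | ⟨⟨h1, h2, h3⟩, hb1, hb2, hb3⟩ <;>
      rcases pvCharCases b with rfl | rfl | rfl | ⟨⟨g1, g2, g3⟩, gb1, gb2, gb3⟩ <;>
      first
      | decide
      | (simp [pvStep, pvP, pvMorse, pvRows, List.lookup, List.filter, *] <;> decide)
  | [a, b, c] =>
    rcases pvCharCases a with rfl | rfl | rfl | ⟨⟨h1, h2, h3⟩, hb1, hb2, hb3⟩ <;>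
      rcases pvCharCases b with rfl | rfl | rfl | ⟨⟨g1, g2, g3⟩, gb1, gb2, gb3⟩ <;>
      rcases pvCharCases c with rfl | rfl | rfl | ⟨⟨f1, f2, f3⟩, fb1, fb2, fb3⟩ <;>
      first
      | decide
      | (simp [pvStep, pvP, pvMorse, pvRows, List.lookup, List.filter, *] <;> decide)
  | a :: b :: c :: d :: rest =>
    have hlen : (a :: b :: c :: d :: rest).length = rest.length + 4 := by simp
    have h1 : rest.length + 4 ≠ 1 := by omega
    have h2 : rest.length + 4 ≠ 2 := by omega
    have h3 : rest.length + 4 ≠ 3 := by omega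
    have hlk : pvRows.lookup (a :: b :: c :: d :: rest).length = none := by
      simp [pvRows, List.lookup, hlen, h1, h2, h3]
    rw [hlk]
    have hfil : pvMorse.filter (pvP (a :: b :: c :: d :: rest)) = [] := by
      rw [List.filter_eq_nil_iff]
      intro p hp
      have hlp : p.1.length ≤ 3 := by
        fin_cases hp <;> simp
      intro h
      simp only [pvP, hlen, Bool.and_eq_true, beq_iff_eq] at h
      obtain ⟨hA, -⟩ := h
      omega
    rw [hfil]
    rfl

-- ===== VERDICT (by name: the statement is the Claim_ definition above) =====
theorem possibilities_spec : Claim_equal_possibilities := by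
  intro word _
  unfold Spec_possibilities
  rw [pvA_eq_filter, ← pvB_eq_filter word.toList]
  rfl
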